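-- pv_equiv track=rewrite | github.com/konszymanski/leetcode-dataset | obfuscated_solutions/python/2064-minimized-maximum-of-products-distributed-to-any-store/solution_1_dead_code.py | can_distribute
-- ===== SOURCE A (Python) =====
-- from typing import List
--
-- def can_distribute(x: int, quantities: List[int], n: int) ->bool:
--     j = 0
--     udaxi = 32 * 2
--     remaining = quantities[j]
--     for i in range(n):
--         if remaining <= x:
--             j += 1
--             if j == len(quantities):
--                 return True
--             else:
--                 remaining = quantities[j]
--         else:
--             remaining -= x
--     return False
-- ===== SOURCE B (Python) =====
-- def can_distribute(x, quantities, n):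
--     needed = 0
--     for q in quantities:
--         if q <= x:
--             needed += 1
--         elif x <= 0:
--             return False
--         else:
--             needed += -(-q // x)
--     return needed <= n
-- ===== Notes on version B (the rewrite author's own statement) =====
-- stated objective: alternative
-- what changed: Replaces A's store-by-store simulation over range(n) with one pass over quantities summing ceil(q/x) stores per quantity and comparing the total to n.
import Mathlib
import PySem

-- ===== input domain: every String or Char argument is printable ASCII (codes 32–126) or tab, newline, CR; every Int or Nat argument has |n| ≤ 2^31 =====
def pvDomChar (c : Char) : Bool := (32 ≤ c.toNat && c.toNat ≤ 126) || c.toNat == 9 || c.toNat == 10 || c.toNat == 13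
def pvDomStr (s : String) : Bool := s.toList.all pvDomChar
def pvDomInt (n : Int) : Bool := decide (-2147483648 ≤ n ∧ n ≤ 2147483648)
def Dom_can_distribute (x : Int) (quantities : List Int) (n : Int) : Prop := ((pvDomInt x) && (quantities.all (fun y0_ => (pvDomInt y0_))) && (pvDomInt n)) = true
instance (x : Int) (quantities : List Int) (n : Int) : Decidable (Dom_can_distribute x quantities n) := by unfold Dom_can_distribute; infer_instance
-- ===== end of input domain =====

-- B replaces A's store-by-store simulation (n iterations) with a single pass over
-- quantities summing the number of stores each quantity needs (ceiling division);
-- equivalence is about the return value on nonempty quantities (A raises on []).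

-- ===== PORT A =====
-- the for-i-in-range(n) loop of A, fuel = remaining iterations; state (j, remaining)
def canDistLoopA (x : Int) (qs : List Int) : Nat → Nat → Int → Bool
  | 0, _, _ => false
  | f + 1, j, remaining =>
    if remaining ≤ x then
      if j + 1 = qs.length then true
      else canDistLoopA x qs f (j + 1) (qs.getD (j + 1) 0)
    else canDistLoopA x qs f j (remaining - x)

def can_distribute (x : Int) (quantities : List Int) (n : Int) : Bool :=
  -- quantities[0] raises IndexError on []: excluded by Pre_can_distribute
  match quantities with
  | [] => false
  | q0 :: _ => canDistLoopA x quantities n.toNat 0 q0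

-- ===== PORT B =====
-- B's loop with accumulator `needed`; `none` = the early `return False` (x <= 0 branch)
def canDistLoopB (x : Int) (qs : List Int) (needed : Int) : Option Int :=
  match qs with
  | [] => some needed
  | q :: rest =>
    if q ≤ x then canDistLoopB x rest (needed + 1)
    else if x ≤ 0 then none
    else canDistLoopB x rest (needed + (-(PySem.Int.floordiv (-q) x)))

def can_distribute_alt (x : Int) (quantities : List Int) (n : Int) : Bool :=
  match canDistLoopB x quantities 0 with
  | none => false
  | some needed => needed ≤ n

-- ===== PRECONDITION & SPEC =====
-- A raises IndexError on empty quantities (quantities[0]); nothing else raises.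
def Pre_can_distribute (x : Int) (quantities : List Int) (n : Int) : Prop := quantities ≠ []
instance (x : Int) (quantities : List Int) (n : Int) : Decidable (Pre_can_distribute x quantities n) := by unfold Pre_can_distribute; infer_instance

def pvWitness_can_distribute : Int × List Int × Int := (3, [7, 2], 4)

def Spec_can_distribute (x : Int) (quantities : List Int) (n : Int) (out : Bool) : Prop := out = can_distribute_alt x quantities n
instance (x : Int) (quantities : List Int) (n : Int) (out : Bool) : Decidable (Spec_can_distribute x quantities n out) := by unfold Spec_can_distribute; infer_instance

-- ===== CLAIM (what is proved, stated in full; the proofs are below) =====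
def Claim_equal_can_distribute : Prop := ∀ (x : Int) (quantities : List Int) (n : Int), Dom_can_distribute x quantities n → Pre_can_distribute x quantities n → Spec_can_distribute x quantities n (can_distribute x quantities n)

-- ===== LEMMAS AND PROOFS =====

-- number of loop iterations A spends to finish one quantity whose current remaining is r
def needOne (x r : Int) : Option Int :=
  if r ≤ x then some 1
  else if x ≤ 0 then none
  else some (-(PySem.Int.floordiv (-r) x))

-- total iterations A needs for a list of quantities (none = stuck forever)
def needList (x : Int) (qs : List Int) : Option Int :=
  match qs with
  | [] => some 0
  | q :: rest => Option.map₂ (· + ·) (needOne x q) (needList x rest)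

theorem needOne_ge_one (x r t : Int) (h : needOne x r = some t) : 1 ≤ t := by
  unfold needOne at h
  split_ifs at h with h1 h2
  · simp only [Option.some.injEq] at h; omega
  · simp only [Option.some.injEq] at h
    have hx : 0 < x := by omega
    have hc := (PySem.Int.neg_floordiv_neg_eq_iff_of_pos (a := r) (q := -(PySem.Int.floordiv (-r) x)) hx).mp rfl
    nlinarith [hc.1, hc.2]

theorem needList_nonneg (x : Int) (qs : List Int) (t : Int) (h : needList x qs = some t) : 0 ≤ t := by
  induction qs generalizing t with
  | nil => simp [needList] at h; omega
  | cons q rest ih =>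
    simp only [needList, Option.map₂] at h
    cases h1 : needOne x q with
    | none => simp [h1] at h
    | some a =>
      cases h2 : needList x rest with
      | none => simp [h1, h2] at h
      | some b =>
        simp [h1, h2] at h
        have := needOne_ge_one x q a h1
        have := ih b h2
        omega

-- stuck: x ≤ 0 and remaining > x never terminates the current quantity
theorem stuck_false (x : Int) (qs : List Int) (f j : Nat) (r : Int)
    (hx : x ≤ 0) (hr : ¬ r ≤ x) : canDistLoopA x qs f j r = false := by
  induction f generalizing r with
  | zero => simp [canDistLoopA]
  | succ f ih =>
    simp only [canDistLoopA, if_neg hr]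
    exact ih (r - x) (by omega)

-- ceiling step: for x > 0, r > x, the current quantity's remaining count drops by one per iteration
theorem needOne_step (x r : Int) (hx : 0 < x) (hr : ¬ r ≤ x) :
    ∀ t, needOne x (r - x) = some t → needOne x r = some (t + 1) := by
  intro t ht
  have hx0 : ¬ x ≤ 0 := by omega
  unfold needOne at ht ⊢
  rw [if_neg hr, if_neg hx0]
  by_cases hrx : r - x ≤ x
  · -- one more iteration finishes: t = 1, need ceil(r/x) = 2
    rw [if_pos hrx] at ht
    simp only [Option.some.injEq] at ht ⊢
    rw [PySem.Int.neg_floordiv_neg_eq_iff_of_pos hx]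
    constructor <;> nlinarith
  · rw [if_neg hrx, if_neg hx0] at ht
    simp only [Option.some.injEq] at ht ⊢
    have hc' := (PySem.Int.neg_floordiv_neg_eq_iff_of_pos (a := r - x) (q := -(PySem.Int.floordiv (-(r - x)) x)) hx).mp rfl
    rw [ht] at hc'
    rw [PySem.Int.neg_floordiv_neg_eq_iff_of_pos hx]
    constructor <;> nlinarith [hc'.1, hc'.2]

-- characterisation of A's loop: it returns true iff the needed iteration count fits in the fuel
theorem loopA_char (x : Int) (f : Nat) : ∀ (qs : List Int) (j : Nat) (r : Int),
    j < qs.length →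
    canDistLoopA x qs f j r =
      (match Option.map₂ (· + ·) (needOne x r) (needList x (qs.drop (j + 1))) with
       | none => false
       | some t => decide (t ≤ (f : Int))) := by
  induction f with
  | zero =>
    intro qs j r hj
    simp only [canDistLoopA]
    cases h1 : needOne x r with
    | none => simp [Option.map₂, h1]
    | some a =>
      cases h2 : needList x (qs.drop (j + 1)) with
      | none => simp [Option.map₂, h1, h2]
      | some b =>
        have := needOne_ge_one x r a h1
        have := needList_nonneg x _ b h2
        simp [Option.map₂, h1, h2]
        omega
  | succ f ih =>
    intro qs j r hj
    by_cases hr : r ≤ x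
    · have h1 : needOne x r = some 1 := by simp [needOne, hr]
      by_cases hend : j + 1 = qs.length
      · have hdrop : qs.drop (j + 1) = [] := by
          apply List.drop_eq_nil_of_le; omega
        simp only [canDistLoopA, if_pos hr, if_pos hend, hdrop, needList, h1, Option.map₂]
        simp
      · have hj1 : j + 1 < qs.length := by omega
        have hdrop : qs.drop (j + 1) = qs.getD (j + 1) 0 :: qs.drop (j + 2) := by
          rw [List.getD_eq_getElem _ _ hj1]
          rw [List.drop_eq_getElem_cons hj1]
        simp only [canDistLoopA, if_pos hr, if_neg hend]
        rw [ih qs (j + 1) (qs.getD (j + 1) 0) hj1]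
        rw [hdrop, needList, h1]
        cases h2 : needOne x (qs.getD (j + 1) 0) with
        | none => simp [Option.map₂, h2]
        | some a =>
          cases h3 : needList x (qs.drop (j + 2)) with
          | none => simp [Option.map₂, h2, h3]
          | some b =>
            simp only [Option.map₂, h2, h3, Option.bind, Option.map]
            simp only [decide_eq_decide]
            have := needOne_ge_one x _ a h2
            have := needList_nonneg x _ b h3
            push_cast
            omega
    · by_cases hx : x ≤ 0
      · have hL := stuck_false x qs (f + 1) j r hx hr
        have h1 : needOne x r = none := by simp [needOne, hr, hx]
        simp [hL, Option.map₂, h1]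
      · simp only [canDistLoopA, if_neg hr]
        rw [ih qs j (r - x) hj]
        cases h1 : needOne x (r - x) with
        | none =>
          have : needOne x r = none := by
            unfold needOne at h1 ⊢
            split_ifs at h1 ⊢ <;> simp_all
          simp [Option.map₂, h1, this]
        | some a =>
          have h1' := needOne_step x r (by omega) hr a h1
          cases h2 : needList x (qs.drop (j + 1)) with
          | none => simp [Option.map₂, h1, h1', h2]
          | some b =>
            simp only [Option.map₂, h1, h1', h2, Option.bind, Option.map]
            simp only [decide_eq_decide]
            have := needOne_ge_one x _ a h1
            have := needList_nonneg x _ b h2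
            push_cast
            omega

-- B's loop computes needList, shifted by the accumulator
theorem loopB_eq_needList (x : Int) (qs : List Int) : ∀ acc : Int,
    canDistLoopB x qs acc = (needList x qs).map (acc + ·) := by
  induction qs with
  | nil => intro acc; simp [canDistLoopB, needList]
  | cons q rest ih =>
    intro acc
    simp only [canDistLoopB, needList]
    by_cases h1 : q ≤ x
    · rw [if_pos h1, ih]
      have : needOne x q = some 1 := by simp [needOne, h1]
      cases h2 : needList x rest <;> simp [this, h2, Option.map₂] <;> ring
    · rw [if_neg h1]
      by_cases hx : x ≤ 0
      · have : needOne x q = none := by simp [needOne, h1, hx]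
        simp [hx, this, Option.map₂]
      · rw [if_neg hx, ih]
        have : needOne x q = some (-(PySem.Int.floordiv (-q) x)) := by simp [needOne, h1, hx]
        cases h2 : needList x rest <;> simp [this, h2, Option.map₂] <;> ring

-- ===== VERDICT (by name: the statement is the Claim_ definition above) =====
theorem can_distribute_spec : Claim_equal_can_distribute := by
  intro x quantities n _ hpre
  unfold Spec_can_distribute
  match quantities with
  | [] => exact absurd rfl hpre
  | q0 :: rest =>
    have hA : can_distribute x (q0 :: rest) n = canDistLoopA x (q0 :: rest) n.toNat 0 q0 := rfl
    unfold can_distribute_alt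
    rw [hA, loopA_char x n.toNat (q0 :: rest) 0 q0 (by simp)]
    rw [loopB_eq_needList x (q0 :: rest) 0]
    have hdrop : (q0 :: rest).drop 1 = rest := rfl
    rw [hdrop]
    show _ = (match ((needList x (q0 :: rest)).map (0 + ·)) with
            | none => false | some needed => decide (needed ≤ n))
    simp only [needList]
    cases h1 : needOne x q0 with
    | none => simp [Option.map₂, h1]
    | some a =>
      cases h2 : needList x rest with
      | none => simp [Option.map₂, h1, h2]
      | some b =>
        have ha := needOne_ge_one x q0 a h1
        have hb := needList_nonneg x rest b h2
        simp only [Option.map₂, h1, h2, Option.bind, Option.map]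
        simp only [decide_eq_decide]
        omega
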